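-- pv_equiv track=rewrite | github.com/fadegehg/CLAM | clam_rl-main/clam/utils/draw_traj.py | find_longest_sequences_within_trails
-- ===== SOURCE A (Python) =====
-- def find_longest_sequences_within_trails(series, trail_length):
--     longest_sequences = []
--
--     for start in range(0, len(series), trail_length):
--         trail_end = start + trail_length
--         trail_series = series[start:trail_end]
--
--         last_value = None
--         current_length = 0
--         max_length = 0
--         max_value = None
--
--         for value in trail_series:
--             if value == last_value:
--                 current_length += 1
--             else:
--                 if current_length > max_length:
--                     max_length = current_length
--                     max_value = last_value
--                 last_value = value
--                 current_length = 1
--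
--         if current_length > max_length:
--             max_length = current_length
--             max_value = last_value
--
--         if max_length > 0:
--             longest_sequences.append((max_value, start, max_length))
--
--     return sorted(longest_sequences, key=lambda x: x[2], reverse=True)[:5]
-- ===== SOURCE B (Python) =====
-- def find_longest_sequences_within_trails(series, trail_length):
--     results = []
--     for start in range(0, len(series), trail_length):
--         # group the trail into (value, run_length) pairs, then reduce
--         runs = []
--         for value in series[start:start + trail_length]:
--             if runs and runs[-1][0] == value:
--                 runs[-1] = (value, runs[-1][1] + 1)
--             else:
--                 runs.append((value, 1))
--         value, length = max(runs, key=lambda run: run[1])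
--         results.append((value, start, length))
--     return sorted(results, key=lambda res: res[2], reverse=True)[:5]
-- ===== Notes on version B (the rewrite author's own statement) =====
-- stated objective: simpler
-- what changed: Replaces A's fused last_value/current_length/max_length state machine by a group-then-reduce decomposition: each trail is grouped into (value, run_length) pairs and the first maximal run is selected with max by run length.
import Mathlib
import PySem

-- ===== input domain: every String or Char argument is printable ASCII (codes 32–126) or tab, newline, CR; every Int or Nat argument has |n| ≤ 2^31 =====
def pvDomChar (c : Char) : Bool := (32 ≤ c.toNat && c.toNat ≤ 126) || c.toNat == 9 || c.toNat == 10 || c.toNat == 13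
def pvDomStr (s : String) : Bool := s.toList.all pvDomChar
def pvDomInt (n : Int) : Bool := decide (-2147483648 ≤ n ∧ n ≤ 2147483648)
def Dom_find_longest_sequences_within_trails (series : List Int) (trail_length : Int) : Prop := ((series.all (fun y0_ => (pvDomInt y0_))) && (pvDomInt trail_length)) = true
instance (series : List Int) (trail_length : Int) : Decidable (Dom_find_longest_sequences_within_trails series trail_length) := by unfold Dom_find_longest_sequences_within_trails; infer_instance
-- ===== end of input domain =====

-- B replaces A's fused last_value/current_length/max_length state machine by grouping each trail
-- into (value, run_length) pairs and then taking the first maximal run (objective: simpler decomposition).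

-- ===== PORT A =====
-- A's inner-loop step: state is (last_value, current_length, max_length, max_value)
def pvAStep (s : Option Int × Int × Int × Option Int) (value : Int) :
    Option Int × Int × Int × Option Int :=
  if some value == s.1 then (s.1, s.2.1 + 1, s.2.2.1, s.2.2.2)
  else if s.2.1 > s.2.2.1 then (some value, 1, s.2.1, s.1)
  else (some value, 1, s.2.2.1, s.2.2.2)

def find_longest_sequences_within_trails (series : List Int) (trail_length : Int) :
    List (Int × Int × Int) :=
  let longest_sequences :=
    (PySem.List.pyRange 0 (series.length : Int) trail_length).foldl (fun acc start =>
      let trail_series := PySem.List.slice series (some start) (some (start + trail_length))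
      let st := trail_series.foldl pvAStep (none, 0, 0, none)
      let fin := if st.2.1 > st.2.2.1 then (st.2.1, st.1) else (st.2.2.1, st.2.2.2)
      -- fin.1 > 0 forces fin.2 = some _, so Python's max_value is exactly fin.2.getD 0 here
      if fin.1 > 0 then acc ++ [(fin.2.getD 0, start, fin.1)] else acc)
      []
  PySem.List.slice (PySem.List.sorted longest_sequences (fun x => x.2.2) true) none (some 5)

-- ===== PORT B =====
-- B's grouping step: extend the last run if the value repeats, else open a new run
def pvRunsStep (runs : List (Int × Int)) (value : Int) : List (Int × Int) :=
  match runs.getLast? with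
  | some r => if r.1 == value then runs.dropLast ++ [(value, r.2 + 1)] else runs ++ [(value, 1)]
  | none => runs ++ [(value, 1)]

def find_longest_sequences_within_trails_alt (series : List Int) (trail_length : Int) :
    List (Int × Int × Int) :=
  let results :=
    (PySem.List.pyRange 0 (series.length : Int) trail_length).foldl (fun acc start =>
      let runs := (PySem.List.slice series (some start) (some (start + trail_length))).foldl
          pvRunsStep []
      -- the trail is nonempty, so runs is nonempty and Python's max never raises: (0,0) is unreachable
      let m := PySem.List.maxD runs (fun run => run.2) (0, 0)
      acc ++ [(m.1, start, m.2)])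
      []
  PySem.List.slice (PySem.List.sorted results (fun res => res.2.2) true) none (some 5)

-- ===== PRECONDITION & SPEC =====
-- Pre_ excludes only trail_length = 0, where Python's range(0, len(series), 0) raises ValueError in both A and B.
def Pre_find_longest_sequences_within_trails (series : List Int) (trail_length : Int) : Prop :=
  trail_length ≠ 0
instance (series : List Int) (trail_length : Int) : Decidable (Pre_find_longest_sequences_within_trails series trail_length) := by unfold Pre_find_longest_sequences_within_trails; infer_instance

def pvWitness_find_longest_sequences_within_trails : List Int × Int := ([1, 1, 2, 2, 2, 3], 3)

def Spec_find_longest_sequences_within_trails (series : List Int) (trail_length : Int) (out : List (Int × Int × Int)) : Prop := out = find_longest_sequences_within_trails_alt series trail_length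
instance (series : List Int) (trail_length : Int) (out : List (Int × Int × Int)) : Decidable (Spec_find_longest_sequences_within_trails series trail_length out) := by unfold Spec_find_longest_sequences_within_trails; infer_instance

-- ===== CLAIM (what is proved, stated in full; the proofs are below) =====
def Claim_equal_find_longest_sequences_within_trails : Prop := ∀ (series : List Int) (trail_length : Int), Dom_find_longest_sequences_within_trails series trail_length → Pre_find_longest_sequences_within_trails series trail_length → Spec_find_longest_sequences_within_trails series trail_length (find_longest_sequences_within_trails series trail_length)

-- ===== LEMMAS AND PROOFS =====

-- proof-only: A's running best as a fold step over runs
def pvBestStep (b : Int × Option Int) (r : Int × Int) : Int × Option Int :=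
  if r.2 > b.1 then (r.2, some r.1) else b

-- Invariant tying A's state machine to B's run list
theorem pv_inv (xs : List Int) :
    (xs = [] ∧ xs.foldl pvRunsStep [] = [] ∧
      xs.foldl pvAStep (none, 0, 0, none) = (none, 0, 0, none)) ∨
    (∃ pre u k, xs.foldl pvRunsStep [] = pre ++ [(u, k)] ∧ (1 : Int) ≤ k ∧
      (∀ r ∈ pre, (1 : Int) ≤ r.2) ∧
      xs.foldl pvAStep (none, 0, 0, none) = (some u, k, pre.foldl pvBestStep (0, none))) := by
  induction xs using List.reverseRecOn with
  | nil => left; exact ⟨rfl, rfl, rfl⟩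
  | append_singleton xs v ih =>
    right
    rw [List.foldl_append, List.foldl_append]
    rcases ih with ⟨-, hr, ha⟩ | ⟨pre, u, k, hr, hk, hpre, ha⟩
    · refine ⟨[], v, 1, ?_, le_refl _, by simp, ?_⟩ <;> simp [hr, ha, pvRunsStep, pvAStep]
    · rw [hr, ha]
      by_cases hv : u = v
      · subst hv
        refine ⟨pre, u, k + 1, ?_, by omega, hpre, ?_⟩
        · simp [pvRunsStep, List.getLast?_append]
        · simp [pvAStep]
      · refine ⟨pre ++ [(u, k)], v, 1, ?_, le_refl _, ?_, ?_⟩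
        · simp [pvRunsStep, List.getLast?_append, hv]
        · intro r hrmem
          rcases List.mem_append.1 hrmem with h | h
          · exact hpre r h
          · simp at h; simp [h, hk]
        · rw [List.foldl_append]
          have hbeq : (some v == some u) = false := by
            simpa using Ne.symm hv
          simp only [pvAStep, hbeq, Bool.false_eq_true, if_false, List.foldl]
          by_cases hkl : k > (List.foldl pvBestStep (0, none) pre).1
          · simp [pvBestStep, hkl]
          · simp [pvBestStep, hkl]

-- Python's first-maximal max(runs, key=length) as an accumulator fold
def pvMF (o : Option (Int × Int)) (rs : List (Int × Int)) : Option (Int × Int) :=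
  rs.foldl (fun acc x => match acc with
    | none => some x
    | some m => if m.2 < x.2 then some x else some m) o

theorem pv_max?_eq (rs : List (Int × Int)) :
    PySem.List.max? rs (fun r => r.2) = pvMF none rs := by
  unfold PySem.List.max? pvMF
  congr 1
  funext acc x
  rcases acc with _ | m <;> rfl

-- A's best fold over runs computes Python's first-maximal max(runs, key=length)
theorem pv_best_max (rs : List (Int × Int)) (h1 : ∀ r ∈ rs, (1 : Int) ≤ r.2)
    (b : Int × Option Int) (o : Option (Int × Int))
    (hrel : match o with
      | none => b = (0, none)
      | some m => b = (m.2, some m.1) ∧ (1 : Int) ≤ m.2) :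
    match pvMF o rs with
    | none => rs.foldl pvBestStep b = (0, none)
    | some m => rs.foldl pvBestStep b = (m.2, some m.1) ∧ (1 : Int) ≤ m.2 := by
  induction rs generalizing b o with
  | nil => exact hrel
  | cons r rest ih =>
    have hr1 : (1 : Int) ≤ r.2 := h1 r (List.mem_cons_self ..)
    have hrest : ∀ x ∈ rest, (1 : Int) ≤ x.2 := fun x hx => h1 x (List.mem_cons_of_mem _ hx)
    show (match pvMF _ rest with
      | none => rest.foldl pvBestStep (pvBestStep b r) = (0, none)
      | some m => rest.foldl pvBestStep (pvBestStep b r) = (m.2, some m.1) ∧ (1 : Int) ≤ m.2)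
    rcases o with _ | m
    · apply ih hrest
      refine ⟨?_, hr1⟩
      simp [hrel, pvBestStep, show (0 : Int) < r.2 by omega]
    · obtain ⟨hb, hm1⟩ := hrel
      show (match pvMF (if m.2 < r.2 then some r else some m) rest with
        | none => rest.foldl pvBestStep (pvBestStep b r) = (0, none)
        | some m => rest.foldl pvBestStep (pvBestStep b r) = (m.2, some m.1) ∧ (1 : Int) ≤ m.2)
      by_cases hlt : m.2 < r.2
      · rw [if_pos hlt]
        apply ih hrest
        exact ⟨by simp [hb, pvBestStep, hlt], hr1⟩
      · rw [if_neg hlt]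
        apply ih hrest
        exact ⟨by simp [hb, pvBestStep, hlt], hm1⟩

-- the per-trail results agree on a nonempty trail
theorem pv_trail (xs : List Int) (hne : xs ≠ []) :
    let st := xs.foldl pvAStep (none, 0, 0, none)
    let fin := if st.2.1 > st.2.2.1 then (st.2.1, st.1) else (st.2.2.1, st.2.2.2)
    let m := PySem.List.maxD (xs.foldl pvRunsStep []) (fun run => run.2) (0, 0)
    0 < fin.1 ∧ fin.1 = m.2 ∧ fin.2.getD 0 = m.1 := by
  intro st fin m
  rcases pv_inv xs with ⟨hnil, -, -⟩ | ⟨pre, u, k, hr, hk, hpre, ha⟩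
  · exact absurd hnil hne
  · have hall : ∀ r ∈ pre ++ [(u, k)], (1 : Int) ≤ r.2 := by
      intro r hrm
      rcases List.mem_append.1 hrm with h | h
      · exact hpre r h
      · simp at h; simp [h, hk]
    have hfin : fin = (pre ++ [(u, k)]).foldl pvBestStep (0, none) := by
      show fin = _
      rw [List.foldl_append]
      simp only [fin, st, ha, List.foldl]
      by_cases hkl : k > (List.foldl pvBestStep (0, none) pre).1
      · simp [pvBestStep, hkl]
      · simp [pvBestStep, hkl]
    have hmax : PySem.List.max? (pre ++ [(u, k)]) (fun r : Int × Int => r.2) ≠ none := by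
      simp [PySem.List.max?_eq_none_iff]
    have hthis := pv_best_max (pre ++ [(u, k)]) hall (0, none) none rfl
    rw [← pv_max?_eq] at hthis
    rcases hcase : PySem.List.max? (pre ++ [(u, k)]) (fun r : Int × Int => r.2) with _ | mm
    · exact absurd hcase hmax
    · rw [hcase] at hthis
      obtain ⟨hfold, hmm1⟩ := hthis
      have hmeq : m = mm := by
        have hm : m = (PySem.List.max? (List.foldl pvRunsStep [] xs)
            (fun run : Int × Int => run.2)).getD (0, 0) := rfl
        rw [hm, hr, hcase]
        rfl
      rw [hmeq, hfin, hfold]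
      exact ⟨by omega, rfl, rfl⟩

-- for a positive step, the trail starting at a range member is nonempty
theorem pv_trail_ne (series : List Int) (L s : Int) (hL : 0 < L)
    (hs : s ∈ PySem.List.pyRange 0 (series.length : Int) L) :
    PySem.List.slice series (some s) (some (s + L)) ≠ [] := by
  rcases (PySem.List.mem_pyRange_iff_of_pos hL s).1 hs with ⟨h0, hlt, -⟩
  rw [PySem.List.slice_toNat series h0 (by omega)]
  have h1 : s.toNat < series.length := by omega
  have h2 : s.toNat < (s + L).toNat := by omega
  intro hcon
  have := congrArg List.length hcon
  simp [List.length_take, List.length_drop] at this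
  omega

-- negative step: the outer range is empty
theorem pv_range_neg (n L : Int) (hn : 0 ≤ n) (hL : L < 0) :
    PySem.List.pyRange 0 n L = [] := by
  unfold PySem.List.pyRange
  rw [if_neg (by omega)]
  simp only [if_neg (by omega : ¬ 0 < L), if_neg (by omega : ¬ n < 0)]
  simp

-- ===== VERDICT (by name: the statement is the Claim_ definition above) =====
theorem find_longest_sequences_within_trails_spec : Claim_equal_find_longest_sequences_within_trails := by
  intro series L _ hpre
  show find_longest_sequences_within_trails series L = find_longest_sequences_within_trails_alt series L
  unfold find_longest_sequences_within_trails find_longest_sequences_within_trails_alt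
  rcases lt_or_gt_of_ne hpre with hL | hL
  · rw [pv_range_neg _ _ (Int.natCast_nonneg _) hL]
    rfl
  · apply congrArg (fun l => PySem.List.slice (PySem.List.sorted l (fun x : Int × Int × Int => x.2.2) true) none (some 5))
    apply PySem.List.foldl_congr_mem
    intro acc s hs
    have hne := pv_trail_ne series L s hL hs
    obtain ⟨hpos, hlen, hval⟩ := pv_trail (PySem.List.slice series (some s) (some (s + L))) hne
    dsimp only
    rw [if_pos hpos, hlen, hval]
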